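-- pv_equiv track=rewrite | github.com/ayush2k5-cpu/gapsADI | backend/exporter.py | _classify_lines
-- ===== SOURCE A (Python) =====
-- from typing import List, Tuple
--
-- _SCENE_PREFIXES: Tuple[str, ...] = ("INT.", "EXT.")
--
-- def _is_scene_heading(line: str) -> bool:
--     stripped: str = line.strip()
--     return any(stripped.startswith(prefix) for prefix in _SCENE_PREFIXES)
--
-- def _is_character_name(
--     stripped: str,
--     prev_was_blank: bool,
--     next_nonblank: str,
-- ) -> bool:
--     """Return True if the line looks like a screenplay character name.
--
--     Criteria:
--         - Non-empty
--         - Entirely upper-case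
--         - Previous line was blank (or it's the start of the script)
--         - The next non-blank line is NOT a scene heading
--     """
--     if not stripped:
--         return False
--     if stripped != stripped.upper():
--         return False
--     if not prev_was_blank:
--         return False
--     if _is_scene_heading(next_nonblank):
--         return False
--     # Scene headings themselves would have already been caught above;
--     # exclude them explicitly to avoid double-marking.
--     if _is_scene_heading(stripped):
--         return False
--     return True
--
-- def _classify_lines(screenplay: str) -> List[Tuple[str, str]]:
--     """Parse screenplay text into a list of (type, text) tuples.
--
--     Types: 'scene', 'character', 'dialogue', 'action', 'blank'
--     """
--     raw_lines: List[str] = screenplay.split("\n")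
--     results: List[Tuple[str, str]] = []
--
--     # Build a look-ahead list of "next non-blank line" for each position.
--     next_nonblank: List[str] = [""] * len(raw_lines)
--     last_nonblank: str = ""
--     for i in range(len(raw_lines) - 1, -1, -1):
--         if raw_lines[i].strip():
--             last_nonblank = raw_lines[i].strip()
--         next_nonblank[i] = last_nonblank
--
--     in_dialogue: bool = False
--     prev_was_blank: bool = True  # treat start-of-script as "after blank"
--
--     for i, raw_line in enumerate(raw_lines):
--         stripped: str = raw_line.strip()
--
--         if not stripped:
--             results.append(("blank", ""))
--             in_dialogue = False
--             prev_was_blank = True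
--             continue
--
--         if _is_scene_heading(stripped):
--             results.append(("scene", stripped))
--             in_dialogue = False
--             prev_was_blank = False
--             continue
--
--         if in_dialogue:
--             results.append(("dialogue", stripped))
--             prev_was_blank = False
--             continue
--
--         nxt: str = next_nonblank[i + 1] if i + 1 < len(raw_lines) else ""
--         if _is_character_name(stripped, prev_was_blank, nxt):
--             results.append(("character", stripped))
--             in_dialogue = True
--             prev_was_blank = False
--             continue
--
--         results.append(("action", stripped))
--         prev_was_blank = False
--
--     return results
-- ===== SOURCE B (Python) =====
-- from typing import List, Tuple
--
-- _SCENE_PREFIXES: Tuple[str, ...] = ("INT.", "EXT.")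
--
-- def _is_scene_heading(line: str) -> bool:
--     stripped: str = line.strip()
--     return any(stripped.startswith(prefix) for prefix in _SCENE_PREFIXES)
--
-- def _is_character_name(stripped: str, prev_was_blank: bool, next_nonblank: str) -> bool:
--     if not stripped:
--         return False
--     if stripped != stripped.upper():
--         return False
--     if not prev_was_blank:
--         return False
--     if _is_scene_heading(next_nonblank):
--         return False
--     if _is_scene_heading(stripped):
--         return False
--     return True
--
-- def _classify_block(block: List[str], next_head: str) -> List[Tuple[str, str]]:
--     """Classify one maximal run of non-blank (stripped) lines.
--
--     Only the block's first line can be a character name (it is the only line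
--     preceded by a blank / start of script); once a character is seen the rest
--     of the block is dialogue until a scene heading switches it back to action.
--     """
--     first = block[0]
--     out: List[Tuple[str, str]] = []
--     if _is_scene_heading(first):
--         out.append(("scene", first))
--         dialogue = False
--     elif _is_character_name(first, True, block[1] if len(block) > 1 else next_head):
--         out.append(("character", first))
--         dialogue = True
--     else:
--         out.append(("action", first))
--         dialogue = False
--     for line in block[1:]:
--         if _is_scene_heading(line):
--             out.append(("scene", line))
--             dialogue = False
--         elif dialogue:
--             out.append(("dialogue", line))
--         else:
--             out.append(("action", line))
--     return out
--
-- def _classify_lines(screenplay: str) -> List[Tuple[str, str]]: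
--     """Block-at-a-time classification: cut the script into maximal runs of
--     non-blank lines and classify each run as a unit (no per-line carried state)."""
--     stripped: List[str] = [l.strip() for l in screenplay.split("\n")]
--     results: List[Tuple[str, str]] = []
--     i, n = 0, len(stripped)
--     while i < n:
--         if not stripped[i]:
--             results.append(("blank", ""))
--             i += 1
--             continue
--         j = i
--         while j < n and stripped[j]:
--             j += 1
--         next_head = next((s for s in stripped[j:] if s), "")
--         results.extend(_classify_block(stripped[i:j], next_head))
--         i = j
--     return results
-- ===== Notes on version B (the rewrite author's own statement) =====
-- stated objective: alternative
-- what changed: B drops A's reverse-built next_nonblank look-ahead table and per-line state machine: it cuts the script into maximal runs of non-blank lines and classifies each run as a unit (only the run's first line can be a character name; the look-ahead is the run's second line or the next run's head).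
import Mathlib
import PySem

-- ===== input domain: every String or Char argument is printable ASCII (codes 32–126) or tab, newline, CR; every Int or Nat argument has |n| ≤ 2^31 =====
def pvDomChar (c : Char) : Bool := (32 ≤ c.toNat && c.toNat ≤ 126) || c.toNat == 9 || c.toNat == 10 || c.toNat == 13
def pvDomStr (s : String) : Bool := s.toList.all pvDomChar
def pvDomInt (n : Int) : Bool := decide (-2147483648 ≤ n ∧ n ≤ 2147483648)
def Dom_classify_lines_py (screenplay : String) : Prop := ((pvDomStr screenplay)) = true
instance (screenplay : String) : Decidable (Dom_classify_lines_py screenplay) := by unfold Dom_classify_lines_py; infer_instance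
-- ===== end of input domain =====

-- B replaces A's next-nonblank look-ahead table and per-line state machine by a
-- block-at-a-time pass: maximal runs of non-blank lines are classified as units.


-- ===== PORT A =====
-- _is_scene_heading (used by both Pythons, identical source)
def isSceneHeading (line : String) : Bool :=
  let stripped := PySem.Str.strip line
  PySem.Str.startswith stripped "INT." || PySem.Str.startswith stripped "EXT."

-- _is_character_name (used by both Pythons, identical source)
def isCharacterName (stripped : String) (prevWasBlank : Bool) (nextNonblank : String) : Bool :=
  if stripped = "" then false
  else if stripped ≠ PySem.Str.upper stripped then false
  else if !prevWasBlank then false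
  else if isSceneHeading nextNonblank then false
  else if isSceneHeading stripped then false
  else true

-- A's reverse loop building the next_nonblank table; returns (table, last_nonblank)
def buildNext : List String → (List String × String)
  | [] => ([], "")
  | l :: rest =>
    let (tbl, last) := buildNext rest
    let s := PySem.Str.strip l
    let last' := if s ≠ "" then s else last
    (last' :: tbl, last')

-- A's main loop; nbt is the part of the table strictly after the current line
-- (next_nonblank[i+1] if i+1 < len else "" = nbt.headD "")
def loopA : List String → List String → Bool → Bool → List (String × String)
  | [], _, _, _ => []
  | l :: rest, nbt, inD, prevB =>
    let s := PySem.Str.strip l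
    if s = "" then ("blank", "") :: loopA rest nbt.tail false true
    else if isSceneHeading s then ("scene", s) :: loopA rest nbt.tail false false
    else if inD then ("dialogue", s) :: loopA rest nbt.tail inD false
    else
      let nxt := nbt.headD ""
      if isCharacterName s prevB nxt then ("character", s) :: loopA rest nbt.tail true false
      else ("action", s) :: loopA rest nbt.tail inD false

def classify_lines_py (screenplay : String) : List (String × String) :=
  -- screenplay.split("\n"): PySem.Chars.splitOn on the code points (sep ≠ "", so exact)
  let raw := (PySem.Chars.splitOn screenplay.toList "\n".toList).map String.ofList
  loopA raw (buildNext raw).1.tail false true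

-- ===== PORT B =====
-- next((s for s in tail if s), ""): first non-blank of the (already stripped) tail
def nextHead : List String → String
  | [] => ""
  | s :: rest => if s ≠ "" then s else nextHead rest

-- _classify_block's loop over block[1:]
def blockTail : List String → Bool → List (String × String)
  | [], _ => []
  | l :: rest, dialogue =>
    if isSceneHeading l then ("scene", l) :: blockTail rest false
    else if dialogue then ("dialogue", l) :: blockTail rest dialogue
    else ("action", l) :: blockTail rest dialogue

-- _classify_block: one maximal run of non-blank stripped lines, classified as a unit
def classifyBlock (block : List String) (next_head : String) : List (String × String) :=
  match block with
  | [] => []  -- unreachable: blocks are non-empty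
  | first :: rest =>
    if isSceneHeading first then ("scene", first) :: blockTail rest false
    else if isCharacterName first true (rest.headD next_head) then
      ("character", first) :: blockTail rest true
    else ("action", first) :: blockTail rest false

-- B's main loop over the stripped lines: emit blanks, else cut off a whole block
def goB : List String → List (String × String)
  | [] => []
  | s :: rest =>
    if s = "" then ("blank", "") :: goB rest
    else
      let block := s :: rest.takeWhile (· ≠ "")
      let after := rest.dropWhile (· ≠ "")
      classifyBlock block (nextHead after) ++ goB after
termination_by l => l.length
decreasing_by
  all_goals simp only [List.length_cons]
  · omega
  · exact Nat.lt_succ_of_le (List.length_dropWhile_le _ _)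

def classify_lines_py_alt (screenplay : String) : List (String × String) :=
  -- stripped = [l.strip() for l in screenplay.split("\n")]
  goB (((PySem.Chars.splitOn screenplay.toList "\n".toList).map String.ofList).map PySem.Str.strip)

-- ===== PRECONDITION & SPEC =====
def Spec_classify_lines_py (screenplay : String) (out : List (String × String)) : Prop := out = classify_lines_py_alt screenplay
instance (screenplay : String) (out : List (String × String)) : Decidable (Spec_classify_lines_py screenplay out) := by unfold Spec_classify_lines_py; infer_instance

-- ===== CLAIM (what is proved, stated in full; the proofs are below) =====
def Claim_equal_classify_lines_py : Prop := ∀ (screenplay : String), Dom_classify_lines_py screenplay → Spec_classify_lines_py screenplay (classify_lines_py screenplay)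

-- ===== LEMMAS AND PROOFS =====

-- unfolding equations for the well-founded goB
theorem goB_nil : goB [] = [] := by rw [goB.eq_def]
theorem goB_blank (r : List String) : goB ("" :: r) = ("blank", "") :: goB r := by
  rw [goB.eq_def]; simp
theorem goB_block (s : String) (r : List String) (h : s ≠ "") :
    goB (s :: r) = classifyBlock (s :: r.takeWhile (· ≠ ""))
      (nextHead (r.dropWhile (· ≠ ""))) ++ goB (r.dropWhile (· ≠ "")) := by
  rw [goB.eq_def]; simp [h]

-- proof-only intermediate: A's state machine over already-stripped lines,
-- with the look-ahead taken by a forward scan instead of the table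
def loopS : List String → Bool → Bool → List (String × String)
  | [], _, _ => []
  | s :: rest, inD, prevB =>
    if s = "" then ("blank", "") :: loopS rest false true
    else if isSceneHeading s then ("scene", s) :: loopS rest false false
    else if inD then ("dialogue", s) :: loopS rest inD false
    else if isCharacterName s prevB (nextHead rest) then ("character", s) :: loopS rest true false
    else ("action", s) :: loopS rest inD false

-- the last_nonblank accumulator of A's reverse loop IS the forward scan (over raw lines)
theorem buildNext_snd (ls : List String) :
    (buildNext ls).2 = nextHead (ls.map PySem.Str.strip) := by
  induction ls with
  | nil => rfl
  | cons l rest ih =>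
    simp only [buildNext, nextHead, List.map]
    split <;> simp_all

theorem buildNext_fst_headD (ls : List String) :
    (buildNext ls).1.headD "" = nextHead (ls.map PySem.Str.strip) := by
  cases ls with
  | nil => rfl
  | cons l rest =>
    have h := buildNext_snd (l :: rest)
    simp only [buildNext] at h ⊢
    simpa using h

theorem buildNext_fst_tail (l : String) (rest : List String) :
    (buildNext (l :: rest)).1.tail = (buildNext rest).1 := by
  simp [buildNext]

-- A's table loop = the state machine over stripped lines
theorem loopA_eq_loopS (ls : List String) (inD prevB : Bool) :
    loopA ls (buildNext ls).1.tail inD prevB = loopS (ls.map PySem.Str.strip) inD prevB := by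
  induction ls generalizing inD prevB with
  | nil => rfl
  | cons l rest ih =>
    rw [buildNext_fst_tail]
    simp only [loopA, loopS, List.map, buildNext_fst_headD]
    split_ifs <;> simp [ih]

-- the look-ahead classifyBlock passes for the first line = the forward scan over the tail
theorem headD_lookahead (rest : List String) :
    (rest.takeWhile (· ≠ "")).headD (nextHead (rest.dropWhile (· ≠ ""))) = nextHead rest := by
  cases rest with
  | nil => rfl
  | cons y r =>
    by_cases hy : y = "" <;> simp [List.takeWhile, List.dropWhile, nextHead, hy]

-- with prev_was_blank = false the character branch is dead, and the state machine
-- consumes exactly one block then continues on the remainder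
theorem loopS_false (ls : List String) (dia : Bool) :
    (∀ l', l'.length < ls.length → loopS l' false true = goB l') →
    loopS ls dia false =
      blockTail (ls.takeWhile (· ≠ "")) dia ++ goB (ls.dropWhile (· ≠ "")) := by
  induction ls generalizing dia with
  | nil =>
    intro _
    simp only [loopS, List.takeWhile_nil, List.dropWhile_nil, blockTail, List.nil_append]
    rw [goB_nil]
  | cons x r ih =>
    intro H
    by_cases hx : x = ""
    · subst hx
      rw [List.takeWhile_cons_of_neg (by simp), List.dropWhile_cons_of_neg (by simp)]
      rw [goB_blank]
      simp [loopS, blockTail, H r (by simp)]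
    · have hc : isCharacterName x false (nextHead r) = false := by
        simp [isCharacterName]
      have H' : ∀ l', l'.length < r.length → loopS l' false true = goB l' := by
        intro l' hl'; exact H l' (Nat.lt_succ_of_lt hl')
      rw [List.takeWhile_cons_of_pos (by simp [hx]), List.dropWhile_cons_of_pos (by simp [hx])]
      by_cases hs : isSceneHeading x
      · simp [loopS, hx, hs, blockTail, ih false H']
      · simp [loopS, hx, hs, hc, blockTail, ih dia H']
        split_ifs <;> simp

-- the state machine (start state) = B's block pass, by strong induction on length
theorem loopS_eq_goB (ls : List String) : loopS ls false true = goB ls := by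
  induction hn : ls.length using Nat.strong_induction_on generalizing ls with
  | _ n IH =>
    subst hn
    cases ls with
    | nil => rw [goB_nil]; rfl
    | cons s rest =>
      have Hrec : ∀ l', l'.length < (s :: rest).length → loopS l' false true = goB l' := by
        intro l' hl'; exact IH l'.length hl' l' rfl
      by_cases hs0 : s = ""
      · subst hs0
        rw [goB_blank]
        simp [loopS, Hrec rest (by simp)]
      · have Hrec' : ∀ l', l'.length < rest.length → loopS l' false true = goB l' := by
          intro l' hl'; exact Hrec l' (Nat.lt_succ_of_lt hl')
        rw [goB_block s rest hs0]
        simp only [loopS, if_neg hs0, classifyBlock, headD_lookahead]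
        by_cases hs : isSceneHeading s
        · simp [hs, loopS_false rest false Hrec']
        · by_cases hc : isCharacterName s true (nextHead rest)
          · simp [hs, hc, loopS_false rest true Hrec']
          · simp [hs, hc, loopS_false rest false Hrec']

-- ===== VERDICT (by name: the statement is the Claim_ definition above) =====
theorem classify_lines_py_spec : Claim_equal_classify_lines_py := by
  intro s _
  unfold Spec_classify_lines_py classify_lines_py classify_lines_py_alt
  rw [loopA_eq_loopS, loopS_eq_goB]
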